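-- pv_equiv track=rewrite | github.com/naimah404/DySCo_Epilepsy_Analysis | dissertation_code/figures/boxplots/generate_three_condition_boxplots.py | condition_label_spd
-- ===== SOURCE A (Python) =====
-- VIDEO_BLOCKS = [(0, 111), (150, 261)]
--
-- WAIT_BLOCKS  = [(111, 150), (261, 296)]
--
-- HALF_WIN     = 10
--
-- LAG          = 20
--
-- def condition_label_spd(i):
--     centre = i + LAG + HALF_WIN
--     for s, e in VIDEO_BLOCKS:
--         if s <= centre < e:
--             return "video"
--     for s, e in WAIT_BLOCKS:
--         if s <= centre < e:
--             return "wait"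
--     return None
-- ===== SOURCE B (Python) =====
-- import bisect
--
-- _BOUNDARIES = [0, 111, 150, 261, 296]
-- _LABELS = [None, "video", "wait", "video", "wait", None]
--
-- HALF_WIN = 10
-- LAG = 20
--
-- def condition_label_spd(i):
--     centre = i + LAG + HALF_WIN
--     return _LABELS[bisect.bisect_right(_BOUNDARIES, centre)]
-- ===== Notes on version B (the rewrite author's own statement) =====
-- stated objective: idiomatic
-- what changed: Replaces the two linear scans over (start,end) block lists by a single bisect_right lookup into a sorted boundary table with a parallel label table.
import Mathlib
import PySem

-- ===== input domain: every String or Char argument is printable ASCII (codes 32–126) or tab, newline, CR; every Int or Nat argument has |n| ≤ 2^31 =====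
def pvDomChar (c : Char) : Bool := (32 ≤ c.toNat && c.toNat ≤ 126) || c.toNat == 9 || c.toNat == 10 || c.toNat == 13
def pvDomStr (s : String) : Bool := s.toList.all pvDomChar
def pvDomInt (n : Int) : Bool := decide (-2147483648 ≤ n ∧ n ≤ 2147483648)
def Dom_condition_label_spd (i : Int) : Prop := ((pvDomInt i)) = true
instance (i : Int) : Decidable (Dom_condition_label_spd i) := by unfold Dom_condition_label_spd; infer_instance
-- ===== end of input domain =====

-- B replaces A's two linear block scans by one bisect_right lookup into a sorted boundary
-- table with a parallel label table (idiomatic; same exact values).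

-- ===== PORT A =====
def pvVIDEO_BLOCKS : List (Int × Int) := [(0, 111), (150, 261)]
def pvWAIT_BLOCKS : List (Int × Int) := [(111, 150), (261, 296)]
def pvHALF_WIN : Int := 10
def pvLAG : Int := 20

-- the 'for s, e in blocks: if s <= centre < e: return label' loop
def pvScan (blocks : List (Int × Int)) (centre : Int) : Bool :=
  match blocks with
  | [] => false
  | (s, e) :: rest => if s ≤ centre ∧ centre < e then true else pvScan rest centre

def condition_label_spd (i : Int) : Option String :=
  let centre := i + pvLAG + pvHALF_WIN
  if pvScan pvVIDEO_BLOCKS centre then some "video"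
  else if pvScan pvWAIT_BLOCKS centre then some "wait"
  else none

-- ===== PORT B =====
def pvBOUNDARIES : List Int := [0, 111, 150, 261, 296]
def pvLABELS : List (Option String) := [none, some "video", some "wait", some "video", some "wait", none]

def condition_label_spd_alt (i : Int) : Option String :=
  let centre := i + pvLAG + pvHALF_WIN
  (pvLABELS.getD (PySem.List.bisectRight pvBOUNDARIES centre) none)

-- ===== PRECONDITION & SPEC =====
def Spec_condition_label_spd (i : Int) (out : Option String) : Prop := out = condition_label_spd_alt i
instance (i : Int) (out : Option String) : Decidable (Spec_condition_label_spd i out) := by unfold Spec_condition_label_spd; infer_instance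

-- ===== CLAIM (what is proved, stated in full; the proofs are below) =====
def Claim_equal_condition_label_spd : Prop := ∀ (i : Int), Dom_condition_label_spd i → Spec_condition_label_spd i (condition_label_spd i)

-- ===== LEMMAS AND PROOFS =====
lemma bis_boundaries (c : Int) :
    PySem.List.bisectRight pvBOUNDARIES c =
      if c < 0 then 0 else if c < 111 then 1 else if c < 150 then 2
      else if c < 261 then 3 else if c < 296 then 4 else 5 := by
  obtain ⟨hlen, hlo, hhi⟩ := PySem.List.bisectRight_spec pvBOUNDARIES c (by decide)
  set k := PySem.List.bisectRight pvBOUNDARIES c with hk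
  have g0 : (0 < k → (0:Int) ≤ c) ∧ (k ≤ 0 → c < 0) :=
    ⟨fun h => hlo 0 (by decide) h, fun h => hhi 0 (by decide) h⟩
  have g1 : (1 < k → (111:Int) ≤ c) ∧ (k ≤ 1 → c < 111) :=
    ⟨fun h => hlo 1 (by decide) h, fun h => hhi 1 (by decide) h⟩
  have g2 : (2 < k → (150:Int) ≤ c) ∧ (k ≤ 2 → c < 150) :=
    ⟨fun h => hlo 2 (by decide) h, fun h => hhi 2 (by decide) h⟩
  have g3 : (3 < k → (261:Int) ≤ c) ∧ (k ≤ 3 → c < 261) :=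
    ⟨fun h => hlo 3 (by decide) h, fun h => hhi 3 (by decide) h⟩
  have g4 : (4 < k → (296:Int) ≤ c) ∧ (k ≤ 4 → c < 296) :=
    ⟨fun h => hlo 4 (by decide) h, fun h => hhi 4 (by decide) h⟩
  have hlen' : k ≤ 5 := hlen
  split_ifs <;> omega

-- ===== VERDICT (by name: the statement is the Claim_ definition above) =====
theorem condition_label_spd_spec : Claim_equal_condition_label_spd := by
  intro i _
  unfold Spec_condition_label_spd condition_label_spd condition_label_spd_alt
  simp only [bis_boundaries]
  simp only [pvScan, pvVIDEO_BLOCKS, pvWAIT_BLOCKS, pvLABELS, pvLAG, pvHALF_WIN]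
  set c := i + 20 + 10 with hc
  split_ifs <;> simp_all <;> omega
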